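-- pv_equiv track=rewrite | github.com/artemiroshnichenko/salesAnalysis | processor/convertor/woocommerce_convertor.py | formate_phone
-- ===== SOURCE A (Python) =====
-- def formate_phone(phone):
--     phone = str(phone)
--     num = ''
--     for element in phone:
--         if element.isdigit() == True:
--             num += element
--     if len(num) > 10:
--         num = num[len(num)-10:]
--     return num
-- ===== SOURCE B (Python) =====
-- def formate_phone(phone):
--     digits = []
--     for element in reversed(str(phone)):
--         if element.isdigit():
--             digits.append(element)
--             if len(digits) == 10:
--                 break
--     digits.reverse()
--     return ''.join(digits)
-- ===== Notes on version B (the rewrite author's own statement) =====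
-- stated objective: alternative
-- what changed: B scans the string in reverse with an early-terminating loop that stops once 10 digits are buffered, then reverses the buffer, instead of A's filter-all-digits pass followed by a tail slice.
import Mathlib
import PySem

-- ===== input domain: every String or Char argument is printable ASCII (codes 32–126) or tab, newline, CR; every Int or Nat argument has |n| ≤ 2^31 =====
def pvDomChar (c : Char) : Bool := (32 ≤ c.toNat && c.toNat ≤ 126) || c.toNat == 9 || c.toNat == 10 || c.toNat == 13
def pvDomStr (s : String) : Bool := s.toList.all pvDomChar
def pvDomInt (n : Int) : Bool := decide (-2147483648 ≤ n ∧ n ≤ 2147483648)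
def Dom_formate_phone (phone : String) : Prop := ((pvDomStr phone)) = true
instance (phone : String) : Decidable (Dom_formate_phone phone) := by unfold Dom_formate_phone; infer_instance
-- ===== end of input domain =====

-- B scans the string from the end, collecting digits into a bounded buffer and stopping
-- as soon as 10 are found, instead of filtering the whole string and slicing its tail
-- (objective: alternative decomposition; same return value).

-- ===== PORT A =====
-- filter all digits front-to-back, then keep the last 10 by slicing
def formate_phone (phone : String) : String :=
  let num : List Char :=
    phone.toList.foldl (fun num element =>
      if PySem.Chars.isdigit element then num ++ [element] else num) []
  let num : List Char :=
    if PySem.Chars.len num > 10 then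
      PySem.Chars.slice num (some ((PySem.Chars.len num : Int) - 10)) none
    else num
  String.ofList num

-- ===== PORT B =====
-- walk the reversed string, append each digit, break at 10 collected
def altGo : List Char → List Char → List Char
  | [], digits => digits
  | element :: rest, digits =>
      if PySem.Chars.isdigit element then
        let digits' := digits ++ [element]
        if digits'.length = 10 then digits' else altGo rest digits'
      else altGo rest digits

def formate_phone_alt (phone : String) : String :=
  String.ofList ((altGo phone.toList.reverse []).reverse)

-- ===== PRECONDITION & SPEC =====
def Spec_formate_phone (phone : String) (out : String) : Prop := out = formate_phone_alt phone
instance (phone : String) (out : String) : Decidable (Spec_formate_phone phone out) := by unfold Spec_formate_phone; infer_instance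

-- ===== CLAIM (what is proved, stated in full; the proofs are below) =====
def Claim_equal_formate_phone : Prop := ∀ (phone : String), Dom_formate_phone phone → Spec_formate_phone phone (formate_phone phone)

-- ===== LEMMAS AND PROOFS =====

-- B's early-stopping loop collects exactly the first (10 - |digits|) digits of the rest
theorem altGo_eq (l : List Char) (digits : List Char) (h : digits.length < 10) :
    altGo l digits = digits ++ (l.filter PySem.Chars.isdigit).take (10 - digits.length) := by
  induction l generalizing digits with
  | nil => simp [altGo]
  | cons c rest ih =>
    by_cases hd : PySem.Chars.isdigit c
    · simp only [altGo, hd, if_true, List.filter_cons_of_pos hd]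
      have hlen : (digits ++ [c]).length = digits.length + 1 := by simp
      by_cases hfull : (digits ++ [c]).length = 10
      · have h10 : 10 - digits.length = 1 := by omega
        simp [hfull, h10]
      · have hlt : (digits ++ [c]).length < 10 := by omega
        rw [if_neg hfull, ih _ hlt]
        have : 10 - digits.length = (10 - (digits ++ [c]).length) + 1 := by omega
        simp [this, List.take_succ_cons]
    · simp only [altGo, hd, List.filter_cons_of_neg hd]
      exact ih digits h

-- A's digit-collecting loop is a filter
theorem foldA_eq (l acc : List Char) :
    l.foldl (fun num c => if PySem.Chars.isdigit c then num ++ [c] else num) acc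
      = acc ++ l.filter PySem.Chars.isdigit := by
  simpa using PySem.List.foldl_append_if PySem.Chars.isdigit (fun c => c) l acc

-- ===== VERDICT (by name: the statement is the Claim_ definition above) =====
theorem formate_phone_spec : Claim_equal_formate_phone := by
  intro phone _
  unfold Spec_formate_phone formate_phone formate_phone_alt
  set f := phone.toList.filter PySem.Chars.isdigit with hf
  rw [show phone.toList.foldl (fun num element =>
        if PySem.Chars.isdigit element then num ++ [element] else num) [] = f by
      simpa using foldA_eq phone.toList []]
  rw [altGo_eq phone.toList.reverse [] (by simp)]
  rw [show phone.toList.reverse.filter PySem.Chars.isdigit = f.reverse by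
      simp [hf, List.filter_reverse]]
  simp only [List.nil_append]
  rw [List.take_reverse]
  congr 1
  by_cases hlen : PySem.Chars.len f > 10
  · rw [if_pos hlen]
    have h10 : (0:Int) ≤ (PySem.Chars.len f : Int) - 10 := by
      simp [PySem.Chars.len_eq] at hlen ⊢; omega
    rw [PySem.Chars.slice_eq_listSlice, PySem.List.slice_from _ h10]
    simp [PySem.Chars.len_eq]
    omega
  · rw [if_neg hlen]
    simp [PySem.Chars.len_eq] at hlen
    simp [Nat.sub_eq_zero_of_le hlen]
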